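-- pv_equiv track=rewrite | github.com/alan-sultan/MyLeetCodes | 2681-put-marbles-in-bags/put-marbles-in-bags.py | putMarbles
-- ===== SOURCE A (Python) =====
-- from typing import List
--
-- def putMarbles(weights: List[int], k: int) -> int:
--     n = len(weights)
--     pairW = [weights[i] + weights[i + 1] for i in range(n - 1)]
--     pairW.sort()
--
--     ans = 0
--     for i in range(k - 1):
--         ans += pairW[n - 2 - i] - pairW[i]
--     return ans
-- ===== SOURCE B (Python) =====
-- def putMarbles(weights, k):
--     m = k - 1
--     if m <= 0:
--         return 0
--     pairs = [a + b for a, b in zip(weights, weights[1:])]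
--     return sum(pairs) - _sum_smallest(pairs, len(pairs) - m) - _sum_smallest(pairs, m)
--
--
-- def _sum_smallest(xs, m):
--     # sum of the m smallest elements of xs: three-way quickselect (median-of-3 pivot)
--     total = 0
--     while m > 0:
--         a = xs[0]
--         b = xs[len(xs) // 2]
--         c = xs[-1]
--         p = a + b + c - min(a, min(b, c)) - max(a, max(b, c))
--         lt = [y for y in xs if y < p]
--         if m <= len(lt):
--             xs = lt
--         else:
--             cnt = xs.count(p)
--             if m <= len(lt) + cnt:
--                 return total + sum(lt) + (m - len(lt)) * p
--             gt = [y for y in xs if y > p]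
--             total = total + sum(lt) + cnt * p
--             m = m - len(lt) - cnt
--             xs = gt
--     return total
-- ===== Notes on version B (the rewrite author's own statement) =====
-- stated objective: alternative
-- what changed: Replaces A's full sort of the adjacent-pair sums and indexed difference loop by an iterative three-way quickselect (median-of-3 pivot) that sums the k-1 smallest pair sums and, via the total sum, the k-1 largest.
import Mathlib
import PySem

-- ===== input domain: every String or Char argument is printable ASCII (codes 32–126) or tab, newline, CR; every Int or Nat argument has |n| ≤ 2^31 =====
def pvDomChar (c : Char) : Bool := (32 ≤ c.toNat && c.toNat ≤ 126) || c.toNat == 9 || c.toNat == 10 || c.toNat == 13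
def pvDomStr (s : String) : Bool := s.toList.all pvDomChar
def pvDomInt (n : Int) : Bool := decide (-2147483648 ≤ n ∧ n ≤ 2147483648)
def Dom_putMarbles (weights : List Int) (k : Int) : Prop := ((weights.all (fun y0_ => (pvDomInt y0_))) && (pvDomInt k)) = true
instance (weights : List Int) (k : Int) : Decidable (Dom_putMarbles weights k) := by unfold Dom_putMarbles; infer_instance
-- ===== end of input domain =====

-- B replaces A's full sort of the adjacent-pair sums by a three-way quickselect
-- (median-of-3 pivot) summing the (k-1) smallest and, via the total, the (k-1)
-- largest pair sums; objective: alternative algorithm.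

-- ===== PORT A =====
-- Literal port of A: pair sums by an index comprehension, Python sort, indexed loop.
-- pyGetD ports Python's xs[i]; every index is in range on Pre_ inputs.
def putMarbles (weights : List Int) (k : Int) : Int :=
  let n : Int := weights.length
  let pairW := (PySem.List.pyRange 0 (n - 1) 1).map (fun i =>
      PySem.List.pyGetD weights i 0 + PySem.List.pyGetD weights (i + 1) 0)
  let sortedW := PySem.List.sorted pairW (fun x => x) false
  (PySem.List.pyRange 0 (k - 1) 1).foldl (fun ans i =>
      ans + (PySem.List.pyGetD sortedW (n - 2 - i) 0 - PySem.List.pyGetD sortedW i 0)) 0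

-- ===== PORT B =====
-- The median-of-3 pivot of Source B's _sum_smallest is one of the three probed elements.
theorem pvMedian3_cases (a b c : Int) :
    a + b + c - min a (min b c) - max a (max b c) = a ∨
    a + b + c - min a (min b c) - max a (max b c) = b ∨
    a + b + c - min a (min b c) - max a (max b c) = c := by
  rcases le_total a b with h1 | h1 <;> rcases le_total b c with h2 | h2 <;>
    rcases le_total a c with h3 | h3 <;> simp [h1, h2, h3] <;> omega

-- Source B's pivot belongs to xs (cited by the port's termination proof).
theorem pvPivot_mem (xs : List Int) (h : xs ≠ []) :
    PySem.List.pyGetD xs 0 0 +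
      PySem.List.pyGetD xs (PySem.Int.floordiv (xs.length : Int) 2) 0 +
      PySem.List.pyGetD xs (-1) 0 -
      min (PySem.List.pyGetD xs 0 0)
        (min (PySem.List.pyGetD xs (PySem.Int.floordiv (xs.length : Int) 2) 0)
          (PySem.List.pyGetD xs (-1) 0)) -
      max (PySem.List.pyGetD xs 0 0)
        (max (PySem.List.pyGetD xs (PySem.Int.floordiv (xs.length : Int) 2) 0)
          (PySem.List.pyGetD xs (-1) 0)) ∈ xs := by
  have hlen : 0 < xs.length := List.length_pos_iff.mpr h
  have hmid : 0 ≤ PySem.Int.floordiv (xs.length : Int) 2 ∧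
      PySem.Int.floordiv (xs.length : Int) 2 < (xs.length : Int) := by
    rw [PySem.Int.floordiv_eq_ediv_of_pos (by omega)]
    omega
  rcases pvMedian3_cases (PySem.List.pyGetD xs 0 0)
      (PySem.List.pyGetD xs (PySem.Int.floordiv (xs.length : Int) 2) 0)
      (PySem.List.pyGetD xs (-1) 0) with hc | hc | hc <;> rw [hc] <;>
    apply PySem.List.pyGetD_mem <;> exact ⟨by omega, by omega⟩

-- Transliteration of Source B's _sum_smallest loop (state: xs, m, total).
-- The [] case returns total: Python raises IndexError there, which Pre_ excludes.
def sumSmallestGo (xs : List Int) (m total : Int) : Int :=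
  if m ≤ 0 then total
  else if hxs : xs = [] then total
  else
    let a := PySem.List.pyGetD xs 0 0
    let b := PySem.List.pyGetD xs (PySem.Int.floordiv (xs.length : Int) 2) 0
    let c := PySem.List.pyGetD xs (-1) 0
    let p := a + b + c - min a (min b c) - max a (max b c)
    let lt := xs.filter (fun y => y < p)
    if m ≤ (lt.length : Int) then sumSmallestGo lt m total
    else
      let cnt : Int := PySem.List.count xs p
      if m ≤ (lt.length : Int) + cnt then total + lt.sum + (m - (lt.length : Int)) * p
      else
        let gt := xs.filter (fun y => p < y)
        sumSmallestGo gt (m - (lt.length : Int) - cnt) (total + lt.sum + cnt * p)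
termination_by xs.length
decreasing_by
  · rw [List.length_unattach, ← List.countP_eq_length_filter,
      List.countP_attach (p := fun y => decide (y < _)),
      List.countP_eq_length_filter, List.length_filter_lt_length_iff_exists]
    exact ⟨_, pvPivot_mem xs hxs, by simp⟩
  · rw [List.length_unattach, ← List.countP_eq_length_filter,
      List.countP_attach (p := fun y => decide (_ < y)),
      List.countP_eq_length_filter, List.length_filter_lt_length_iff_exists]
    exact ⟨_, pvPivot_mem xs hxs, by simp⟩

def putMarbles_alt (weights : List Int) (k : Int) : Int :=
  let m := k - 1
  if m ≤ 0 then 0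
  else
    let pairs := (weights.zip (PySem.List.slice weights (some 1) none)).map
      (fun ab => ab.1 + ab.2)
    pairs.sum - sumSmallestGo pairs ((pairs.length : Int) - m) 0 - sumSmallestGo pairs m 0

-- ===== PRECONDITION & SPEC =====
-- Exactly where Python A returns: with k ≥ 2 and k > len(weights) the loop reads
-- pairW out of range and A raises IndexError; nothing A returns on is excluded.
def Pre_putMarbles (weights : List Int) (k : Int) : Prop :=
  k ≤ (weights.length : Int) ∨ k ≤ 1
instance (weights : List Int) (k : Int) : Decidable (Pre_putMarbles weights k) := by
  unfold Pre_putMarbles; infer_instance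

def pvWitness_putMarbles : List Int × Int := ([1, 2, 3, 4], 3)

def Spec_putMarbles (weights : List Int) (k : Int) (out : Int) : Prop := out = putMarbles_alt weights k
instance (weights : List Int) (k : Int) (out : Int) : Decidable (Spec_putMarbles weights k out) := by unfold Spec_putMarbles; infer_instance

-- ===== CLAIM (what is proved, stated in full; the proofs are below) =====
def Claim_equal_putMarbles : Prop := ∀ (weights : List Int) (k : Int), Dom_putMarbles weights k → Pre_putMarbles weights k → Spec_putMarbles weights k (putMarbles weights k)

-- ===== LEMMAS AND PROOFS =====

-- sorted(xs) splits at a pivot p into sorted(<p) ++ p-repetitions ++ sorted(>p).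
theorem pvSorted_decomp (xs : List Int) (p : Int) :
    PySem.List.sorted xs (fun x => x) false =
      PySem.List.sorted (xs.filter (fun y => y < p)) (fun x => x) false
        ++ List.replicate (PySem.List.count xs p) p
        ++ PySem.List.sorted (xs.filter (fun y => p < y)) (fun x => x) false := by
  apply PySem.List.sorted_id_eq_of_perm_of_pairwise
  · -- the right-hand side is a permutation of xs
    have hlt := PySem.List.sorted_perm (xs.filter (fun y => y < p)) (fun x => x) false
    have hgt := PySem.List.sorted_perm (xs.filter (fun y => p < y)) (fun x => x) false
    have hsplit1 := List.filter_append_perm (fun y => decide (y < p)) xs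
    have hsplit2 := List.filter_append_perm (fun y => y == p)
        (xs.filter (fun y => !decide (y < p)))
    have heq1 : (xs.filter (fun y => !decide (y < p))).filter (fun y => y == p)
        = List.replicate (PySem.List.count xs p) p := by
      rw [List.filter_filter,
        List.filter_congr (q := fun y => y == p) (by
          intro x hx
          by_cases h2 : x = p
          · subst h2; simp
          · simp [h2]),
        List.filter_beq]
      rfl
    have heq2 : (xs.filter (fun y => !decide (y < p))).filter (fun y => !(y == p))
        = xs.filter (fun y => decide (p < y)) := by
      rw [List.filter_filter]
      apply List.filter_congr
      intro x hx
      by_cases h1 : x < p <;> by_cases h2 : x = p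
      · exfalso; omega
      · simp [h1]; omega
      · subst h2; simp
      · have h3 : p < x := by omega
        simp [h2, h3]
        omega
    have h4 : (List.replicate (PySem.List.count xs p) p
          ++ xs.filter (fun y => decide (p < y))).Perm
        (xs.filter (fun y => !decide (y < p))) := by
      rw [← heq1, ← heq2]
      exact hsplit2
    have h3 : (List.replicate (PySem.List.count xs p) p
          ++ PySem.List.sorted (xs.filter (fun y => p < y)) (fun x => x) false).Perm
        (xs.filter (fun y => !decide (y < p))) := by
      exact ((List.Perm.refl _).append hgt).trans h4
    rw [List.append_assoc]
    exact (hlt.append h3).trans hsplit1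
  · -- the right-hand side is sorted
    rw [List.append_assoc, List.pairwise_append, List.pairwise_append]
    refine ⟨PySem.List.sorted_pairwise _ _, ⟨?_, PySem.List.sorted_pairwise _ _, ?_⟩, ?_⟩
    · rw [List.pairwise_replicate]; right; exact le_refl p
    · intro a ha b hb
      have ha' : a = p := List.eq_of_mem_replicate ha
      have hb' : b ∈ xs.filter (fun y => p < y) := (PySem.List.mem_sorted _ _ _ _).mp hb
      have := (List.mem_filter.mp hb').2
      simp at this
      omega
    · intro a ha b hb
      have ha' : a ∈ xs.filter (fun y => y < p) := (PySem.List.mem_sorted _ _ _ _).mp ha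
      have h1 := (List.mem_filter.mp ha').2
      simp at h1
      rcases List.mem_append.mp hb with hb1 | hb2
      · have : b = p := List.eq_of_mem_replicate hb1
        omega
      · have hb' : b ∈ xs.filter (fun y => p < y) := (PySem.List.mem_sorted _ _ _ _).mp hb2
        have h2 := (List.mem_filter.mp hb').2
        simp at h2
        omega

theorem pvLen_decomp (xs : List Int) (p : Int) :
    xs.length = (xs.filter (fun y => y < p)).length + PySem.List.count xs p
      + (xs.filter (fun y => p < y)).length := by
  have h := congrArg List.length (pvSorted_decomp xs p)
  simp [PySem.List.length_sorted] at h
  simp [PySem.List.count]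
  omega

-- the quickselect loop sums total plus the m smallest elements of xs
theorem pvGo (n : Nat) : ∀ (xs : List Int), xs.length = n → ∀ (m total : Int),
    0 ≤ m → m ≤ (xs.length : Int) →
    sumSmallestGo xs m total =
      total + ((PySem.List.sorted xs (fun x => x) false).take m.toNat).sum := by
  induction n using Nat.strong_induction_on with
  | _ n ih =>
    intro xs hn m total hm0 hmlen
    rw [sumSmallestGo]
    by_cases hm : m ≤ 0
    · have hz : m = 0 := le_antisymm hm hm0
      simp [hz]
    · have hxs : xs ≠ [] := by
        intro h; subst h; simp at hmlen; omega
      simp only [if_neg hm, dif_neg hxs]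
      set P := PySem.List.pyGetD xs 0 0 +
          PySem.List.pyGetD xs (PySem.Int.floordiv (xs.length : Int) 2) 0 +
          PySem.List.pyGetD xs (-1) 0 -
          min (PySem.List.pyGetD xs 0 0)
            (min (PySem.List.pyGetD xs (PySem.Int.floordiv (xs.length : Int) 2) 0)
              (PySem.List.pyGetD xs (-1) 0)) -
          max (PySem.List.pyGetD xs 0 0)
            (max (PySem.List.pyGetD xs (PySem.Int.floordiv (xs.length : Int) 2) 0)
              (PySem.List.pyGetD xs (-1) 0)) with hP
      have hpmem : P ∈ xs := pvPivot_mem xs hxs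
      have hsd := pvSorted_decomp xs P
      have hlen := pvLen_decomp xs P
      by_cases hb1 : m ≤ ((xs.filter (fun y => y < P)).length : Int)
      · rw [if_pos hb1]
        have hlt : (xs.filter (fun y => y < P)).length < n := by
          rw [← hn, List.length_filter_lt_length_iff_exists]
          exact ⟨P, hpmem, by simp⟩
        rw [ih _ hlt _ rfl m total hm0 (by exact_mod_cast hb1)]
        rw [hsd, List.append_assoc, List.take_append_of_le_length (by
          rw [PySem.List.length_sorted]; omega)]
      · rw [if_neg hb1]
        by_cases hb2 : m ≤ ((xs.filter (fun y => y < P)).length : Int) + (PySem.List.count xs P : Int)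
        · rw [if_pos hb2]
          rw [hsd, List.append_assoc, List.take_append,
            List.take_of_length_le (by rw [PySem.List.length_sorted]; omega),
            List.take_append_of_le_length (by
              rw [PySem.List.length_sorted, List.length_replicate]; omega),
            List.take_replicate, List.sum_append, List.sum_replicate,
            (PySem.List.sorted_perm (xs.filter (fun y => y < P)) (fun x => x) false).sum_eq,
            PySem.List.length_sorted]
          have hmin : min (m.toNat - (xs.filter (fun y => y < P)).length)
              (PySem.List.count xs P) = (m - ((xs.filter (fun y => y < P)).length : Int)).toNat := by
            omega
          rw [hmin, nsmul_eq_mul]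
          have hcast : (((m - ((xs.filter (fun y => y < P)).length : Int)).toNat : Nat) : Int)
              = m - ((xs.filter (fun y => y < P)).length : Int) := by omega
          rw [hcast]
          ring
        · rw [if_neg hb2]
          have hgt : (xs.filter (fun y => P < y)).length < n := by
            rw [← hn, List.length_filter_lt_length_iff_exists]
            exact ⟨P, hpmem, by simp⟩
          have hL1 : (PySem.List.sorted (xs.filter (fun y => y < P)) (fun x => x) false).length ≤ m.toNat := by
            rw [PySem.List.length_sorted]; omega
          have hL2 : (List.replicate (PySem.List.count xs P) P).length ≤
              m.toNat - (PySem.List.sorted (xs.filter (fun y => y < P)) (fun x => x) false).length := by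
            rw [List.length_replicate, PySem.List.length_sorted]; omega
          rw [ih _ hgt _ rfl _ _ (by omega) (by omega)]
          rw [hsd, List.append_assoc, List.take_append,
            List.take_of_length_le hL1, List.take_append,
            List.take_of_length_le hL2,
            List.sum_append, List.sum_append, List.sum_replicate,
            (PySem.List.sorted_perm (xs.filter (fun y => y < P)) (fun x => x) false).sum_eq,
            PySem.List.length_sorted, List.length_replicate, nsmul_eq_mul]
          have hidx : m.toNat - (xs.filter (fun y => y < P)).length - PySem.List.count xs P
              = (m - ((xs.filter (fun y => y < P)).length : Int)
                - (PySem.List.count xs P : Int)).toNat := by omega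
          rw [hidx]
          ring

-- A's indexed loop over the sorted pair list, in closed form
theorem pvLoop (s : List Int) (n : Int) (hn : n = (s.length : Int) + 1) (init : Int) :
    ∀ (m : Nat), m ≤ s.length →
    (PySem.List.pyRange 0 (m : Int) 1).foldl (fun ans i =>
        ans + (PySem.List.pyGetD s (n - 2 - i) 0 - PySem.List.pyGetD s i 0)) init
      = init + (s.drop (s.length - m)).sum - (s.take m).sum := by
  intro m
  induction m with
  | zero =>
    intro _
    rw [Nat.cast_zero, PySem.List.pyRange_one_eq_nil (le_refl 0)]
    simp [List.drop_length]
  | succ m ihm =>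
    intro hm
    have hm' : m ≤ s.length := by omega
    have hcast : ((m + 1 : Nat) : Int) = (m : Int) + 1 := by push_cast; ring
    rw [hcast, PySem.List.pyRange_one_succ_right (by positivity), List.foldl_append,
      ihm hm', List.foldl_cons, List.foldl_nil]
    have h1 : s.drop (s.length - (m + 1)) =
        s[s.length - (m + 1)]'(by omega) :: s.drop (s.length - (m + 1) + 1) :=
      List.drop_eq_getElem_cons (by omega)
    have h2 : s.length - (m + 1) + 1 = s.length - m := by omega
    have h3 : s.take (m + 1) = s.take m ++ [s[m]'(by omega)] := by
      rw [List.take_add_one, List.getElem?_eq_getElem (by omega)]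
      rfl
    have hx : PySem.List.pyGetD s (n - 2 - (m : Int)) 0 = s[s.length - (m + 1)]'(by omega) := by
      rw [PySem.List.pyGetD_eq_getElem s 0 (by omega) (by omega)]
      congr 1
      omega
    have hy : PySem.List.pyGetD s ((m : Int)) 0 = s[m]'(by omega) := by
      rw [PySem.List.pyGetD_eq_getElem s 0 (by omega) (by exact_mod_cast hm)]
      simp
    rw [h2] at h1
    rw [h1, h3, List.sum_cons, List.sum_append, List.sum_cons, List.sum_nil, hx, hy]
    ring

theorem pvZipAux : ∀ (w : List Int),
    (List.range (w.length - 1)).map (fun i => w.getD i 0 + w.getD (i + 1) 0)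
      = (w.zip w.tail).map (fun ab => ab.1 + ab.2) := by
  intro w
  induction w with
  | nil => simp
  | cons x w ih =>
    cases w with
    | nil => simp
    | cons y t =>
      simp only [List.length_cons, Nat.add_sub_cancel, List.range_succ_eq_map,
        List.map_cons, List.map_map, List.zip_cons_cons, List.tail_cons]
      refine congrArg₂ List.cons rfl ?_
      have ih' := ih
      simp only [List.length_cons, Nat.add_sub_cancel, List.tail_cons] at ih'
      rw [← ih']
      apply List.map_congr_left
      intro k hk
      rfl

-- A's comprehension and B's zip build the same pair-sum list
theorem pvPairs_eq (w : List Int) :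
    (PySem.List.pyRange 0 ((w.length : Int) - 1) 1).map (fun i =>
        PySem.List.pyGetD w i 0 + PySem.List.pyGetD w (i + 1) 0)
      = (w.zip (PySem.List.slice w (some 1) none)).map (fun ab => ab.1 + ab.2) := by
  rw [PySem.List.slice_from_one, PySem.List.pyRange_one, List.map_map, ← pvZipAux w]
  have hn : (((w.length : Int) - 1) - 0).toNat = w.length - 1 := by omega
  rw [hn]
  apply List.map_congr_left
  intro k hk
  simp only [Function.comp_apply, zero_add]
  rw [show ((k : Int) + 1) = ((k + 1 : Nat) : Int) from by push_cast; ring,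
    PySem.List.pyGetD_natCast, PySem.List.pyGetD_natCast]

-- ===== VERDICT (by name: the statement is the Claim_ definition above) =====
theorem putMarbles_spec : Claim_equal_putMarbles := by
  intro weights k _ hpre
  unfold Spec_putMarbles
  simp only [putMarbles, putMarbles_alt]
  by_cases hk1 : k - 1 ≤ 0
  · rw [if_pos hk1, PySem.List.pyRange_one_eq_nil (a := 0) (b := k - 1) (by omega)]
    rfl
  · rw [if_neg hk1]
    have hkn : k ≤ (weights.length : Int) := by
      rcases hpre with h | h
      · exact h
      · omega
    rw [pvPairs_eq weights]
    set pairs := (weights.zip (PySem.List.slice weights (some 1) none)).map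
      (fun ab => ab.1 + ab.2) with hpairs
    have hlen : pairs.length = weights.length - 1 := by
      rw [hpairs, PySem.List.slice_from_one]
      simp [List.length_zip, List.length_tail]
    set s := PySem.List.sorted pairs (fun x => x) false with hs
    have hslen : s.length = pairs.length := PySem.List.length_sorted pairs _ _
    set mN := (k - 1).toNat with hmN
    have hwpos : 2 ≤ weights.length := by omega
    have hcast : (k - 1) = (mN : Int) := by omega
    rw [hcast]
    rw [pvLoop s (weights.length : Int) (by omega) 0 mN (by omega)]
    rw [pvGo pairs.length pairs rfl ((pairs.length : Int) - (mN : Int)) 0 (by omega) (by omega)]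
    rw [pvGo pairs.length pairs rfl (mN : Int) 0 (by omega) (by omega)]
    have hsum : s.sum = pairs.sum := (PySem.List.sorted_perm pairs _ _).sum_eq
    have hsplit := congrArg List.sum
      (List.take_append_drop (((pairs.length : Int) - (mN : Int)).toNat) s)
    rw [List.sum_append] at hsplit
    have h2 : ((pairs.length : Int) - (mN : Int)).toNat = s.length - mN := by omega
    rw [h2] at hsplit ⊢
    simp only [Int.toNat_natCast, ← hs]
    omega
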